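-- pv_equiv track=rewrite | github.com/igribov/alg | sort/counting_sort_2.py | countKeysLess
-- ===== SOURCE A (Python) =====
-- def countKeysLess(equal, m):
--     less = { i : 0 for i in m }
--     for j in m:
--         previos = [i for i in m if i < j]
--         if previos:
--             prev_j = previos[-1]
--             less[j] = less[prev_j] + equal[prev_j]
--     return less
-- ===== SOURCE B (Python) =====
-- def countKeysLess(equal, m):
--     # For each distinct key v, A's previos[-1] is the element of m at the
--     # greatest index among values < v; one stable sort by value plus a sweep
--     # tracking the maximum index seen yields all of them, then the cumulative
--     # recurrence runs in one O(1)-per-step pass over m.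
--     prev = {}
--     best_i, best_v = -1, None
--     for i, v in sorted(enumerate(m), key=lambda t: t[1]):
--         if v not in prev:
--             prev[v] = best_v
--         if i > best_i:
--             best_i, best_v = i, v
--     less = dict.fromkeys(m, 0)
--     for j in m:
--         p = prev[j]
--         if p is not None:
--             less[j] = less[p] + equal[p]
--     return less
-- ===== Notes on version B (the rewrite author's own statement) =====
-- stated objective: faster
-- what changed: A's per-element full scan of m for the last smaller element is replaced by one stable sort of the enumerated list plus a max-index sweep that precomputes every predecessor, after which the cumulative pass over m is O(1) per step.
import Mathlib
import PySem

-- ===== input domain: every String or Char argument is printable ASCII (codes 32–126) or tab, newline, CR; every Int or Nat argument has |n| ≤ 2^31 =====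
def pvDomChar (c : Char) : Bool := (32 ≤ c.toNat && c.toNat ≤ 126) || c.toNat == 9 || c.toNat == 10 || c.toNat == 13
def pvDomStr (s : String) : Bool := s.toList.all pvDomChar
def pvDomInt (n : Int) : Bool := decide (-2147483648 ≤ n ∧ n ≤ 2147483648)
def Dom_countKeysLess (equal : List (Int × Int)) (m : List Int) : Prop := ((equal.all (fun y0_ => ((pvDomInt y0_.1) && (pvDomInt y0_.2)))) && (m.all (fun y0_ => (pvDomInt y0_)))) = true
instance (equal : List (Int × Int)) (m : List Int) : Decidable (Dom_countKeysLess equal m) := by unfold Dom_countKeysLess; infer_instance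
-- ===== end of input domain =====

-- B replaces A's quadratic per-element scan of m by ONE stable sort of the enumerated
-- list plus a max-index sweep that precomputes every predecessor (objective: faster).

-- ===== PORT A =====
-- less[prev_j] always succeeds (prev_j ∈ m ⊆ keys of less), ported with getD;
-- equal[prev_j] may raise KeyError in Python: Pre_ excludes exactly those inputs,
-- the port uses getD 0 there (value unconstrained outside Pre_).
def countKeysLess (equal : List (Int × Int)) (m : List Int) : List (Int × Int) :=
  let eq := PySem.Dict.ofList equal
  let less0 := m.foldl (fun (d : PySem.Dict Int Int) i => d.insert i 0) PySem.Dict.empty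
  let fin := m.foldl (fun (less : PySem.Dict Int Int) j =>
      let previos := m.filter (fun i => decide (i < j))
      match previos.getLast? with
      | some pj => less.insert j (less.getD pj 0 + eq.getD pj 0)
      | none => less) less0
  fin.items

-- ===== PORT B =====
-- 'if i > best_i: best_i, best_v = i, v'  (the max-index sweep step)
def bestStep (s : Int × Option Int) (e : Int × Int) : Int × Option Int :=
  if s.1 < e.1 then (e.1, some e.2) else s

-- one step of the sweep over the sorted enumerated list:
-- 'if v not in prev: prev[v] = best_v' then the bestStep update
def prevStep (st : PySem.Dict Int (Option Int) × (Int × Option Int)) (e : Int × Int) :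
    PySem.Dict Int (Option Int) × (Int × Option Int) :=
  ((if st.1.contains e.2 then st.1 else st.1.insert e.2 st.2.2), bestStep st.2 e)

-- prev[j] always succeeds (every value of m is a key of prev), ported with getD;
-- less[p] always succeeds (keys of less = values of m), ported with getD;
-- equal[p] may raise KeyError: outside Pre_, same as in port A.
def countKeysLess_alt (equal : List (Int × Int)) (m : List Int) : List (Int × Int) :=
  let eq := PySem.Dict.ofList equal
  let pairs := PySem.List.sorted (PySem.List.enumerate m) (fun t => t.2)
  let prev := (pairs.foldl prevStep (PySem.Dict.empty, (-1, none))).1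
  let fin := m.foldl (fun (less : PySem.Dict Int Int) j =>
      match prev.getD j none with
      | some p => less.insert j (less.getD p 0 + eq.getD p 0)
      | none => less) (PySem.Dict.ofList (m.map (fun i => (i, 0))))
  fin.items

-- ===== PRECONDITION & SPEC =====
-- Pre_ excludes exactly the inputs on which Python A raises KeyError (equal[prev_j]
-- with prev_j not a key of equal); Python B raises the same KeyError there.
def Pre_countKeysLess (equal : List (Int × Int)) (m : List Int) : Prop :=
  ∀ j ∈ m, ((m.reverse.find? (fun i => decide (i < j))).all
      (fun p => ((PySem.Dict.ofList equal).get? p).isSome)) = true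
instance (equal : List (Int × Int)) (m : List Int) : Decidable (Pre_countKeysLess equal m) := by
  unfold Pre_countKeysLess; infer_instance
def pvWitness_countKeysLess : (List (Int × Int)) × List Int := ([(1, 2), (3, 4)], [3, 1, 3])

def Spec_countKeysLess (equal : List (Int × Int)) (m : List Int) (out : List (Int × Int)) : Prop := out = countKeysLess_alt equal m
instance (equal : List (Int × Int)) (m : List Int) (out : List (Int × Int)) : Decidable (Spec_countKeysLess equal m out) := by unfold Spec_countKeysLess; infer_instance

-- ===== CLAIM (what is proved, stated in full; the proofs are below) =====
def Claim_equal_countKeysLess : Prop := ∀ (equal : List (Int × Int)) (m : List Int), Dom_countKeysLess equal m → Pre_countKeysLess equal m → Spec_countKeysLess equal m (countKeysLess equal m)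

-- ===== LEMMAS AND PROOFS =====

-- the (best_i, best_v) component of the sweep ignores the dict component
theorem snd_foldl_prevStep (L : List (Int × Int)) (d : PySem.Dict Int (Option Int))
    (s : Int × Option Int) : (L.foldl prevStep (d, s)).2 = L.foldl bestStep s := by
  induction L generalizing d s with
  | nil => rfl
  | cons e t ih => simpa [prevStep] using ih _ _

-- keys of the dict component come from the init dict or the processed values
theorem contains_foldl_prevStep (L : List (Int × Int)) (d : PySem.Dict Int (Option Int))
    (s : Int × Option Int) (j : Int)
    (h : ((L.foldl prevStep (d, s)).1.contains j) = true) :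
    d.contains j = true ∨ j ∈ L.map (·.2) := by
  induction L generalizing d s with
  | nil => exact Or.inl h
  | cons e t ih =>
    simp only [List.foldl_cons] at h
    rcases ih _ _ h with hc | hm
    · by_cases hde : d.contains e.2
      · simp only [hde, if_pos] at hc
        exact Or.inl hc
      · rw [if_neg (by simp [hde]), PySem.Dict.contains_insert] at hc
        rcases Bool.or_eq_true_iff.mp hc with hj | hj
        · right; simp only [List.map_cons, List.mem_cons]
          exact Or.inl (by simpa using hj)
        · exact Or.inl hj
    · right; simp only [List.map_cons, List.mem_cons]
      exact Or.inr hm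

-- once a key is bound in the dict component it stays bound to the same value
theorem get?_foldl_prevStep (L : List (Int × Int)) (d : PySem.Dict Int (Option Int))
    (s : Int × Option Int) (j : Int) (w : Option Int) (h : d.get? j = some w) :
    (L.foldl prevStep (d, s)).1.get? j = some w := by
  induction L generalizing d s with
  | nil => exact h
  | cons e t ih =>
    simp only [List.foldl_cons]
    by_cases hde : d.contains e.2
    · exact ih _ _ (by simpa [prevStep, hde] using h)
    · have hne : j ≠ e.2 := by
        intro hjz
        apply hde
        rw [PySem.Dict.contains_eq_isSome_get?, ← hjz, h]
        rfl
      refine ih _ _ ?_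
      rw [if_neg hde, PySem.Dict.get?_insert, if_neg hne]
      exact h

-- the sweep result bounds every processed index (and the initial bound)
theorem bestFold_ub (L : List (Int × Int)) (s : Int × Option Int) :
    s.1 ≤ (L.foldl bestStep s).1 ∧ ∀ e ∈ L, e.1 ≤ (L.foldl bestStep s).1 := by
  induction L generalizing s with
  | nil => exact ⟨le_refl _, by simp⟩
  | cons e t ih =>
    simp only [List.foldl_cons]
    obtain ⟨h1, h2⟩ := ih (bestStep s e)
    have hse : s.1 ≤ (bestStep s e).1 ∧ e.1 ≤ (bestStep s e).1 := by
      simp only [bestStep]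
      split_ifs with h
      · exact ⟨le_of_lt h, le_refl _⟩
      · exact ⟨le_refl _, by omega⟩
    exact ⟨le_trans hse.1 h1, by
      intro e' he'
      rcases List.mem_cons.mp he' with rfl | ht
      · exact le_trans hse.2 h1
      · exact h2 e' ht⟩

-- the sweep result is the initial state or comes from a processed entry
theorem bestFold_cases (L : List (Int × Int)) (s : Int × Option Int) :
    L.foldl bestStep s = s ∨ ∃ e ∈ L, L.foldl bestStep s = (e.1, some e.2) := by
  induction L generalizing s with
  | nil => exact Or.inl rfl
  | cons e t ih =>
    simp only [List.foldl_cons]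
    rcases ih (bestStep s e) with h | ⟨e', he', h⟩
    · rw [h]; simp only [bestStep]
      split_ifs
      · exact Or.inr ⟨e, by simp⟩
      · exact Or.inl rfl
    · exact Or.inr ⟨e', by simp [he'], h⟩

-- with distinct first components, equal firsts force equal pairs
theorem eq_of_fst_eq_of_nodup (L : List (Int × Int)) (h : (L.map Prod.fst).Nodup)
    (a b : Int × Int) (ha : a ∈ L) (hb : b ∈ L) (hf : a.1 = b.1) : a = b := by
  induction L with
  | nil => cases ha
  | cons e t ih =>
    simp only [List.map_cons, List.nodup_cons] at h
    rcases List.mem_cons.mp ha with rfl | hat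
    · rcases List.mem_cons.mp hb with rfl | hbt
      · rfl
      · exact absurd (hf ▸ List.mem_map_of_mem hbt) h.1
    · rcases List.mem_cons.mp hb with rfl | hbt
      · exact absurd (hf ▸ List.mem_map_of_mem hat) h.1
      · exact ih h.2 hat hbt

-- the sweep result does not depend on the processing order (indices are distinct)
theorem bestFold_perm (L1 L2 : List (Int × Int)) (hp : L1.Perm L2)
    (hnd : (L1.map Prod.fst).Nodup) (hpos : ∀ e ∈ L1, (0:Int) ≤ e.1) :
    L1.foldl bestStep (-1, none) = L2.foldl bestStep (-1, none) := by
  cases L1 with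
  | nil => rw [hp.nil_eq]
  | cons a t =>
    have he0 : a ∈ a :: t := by simp
    have hub1 := bestFold_ub (a :: t) (-1, none)
    have hub2 := bestFold_ub L2 (-1, none)
    rcases bestFold_cases (a :: t) (-1, none) with h1 | ⟨e1, he1, h1⟩
    · exfalso
      have h := hub1.2 a he0
      rw [h1] at h
      have := hpos a he0
      simp at h; omega
    · rcases bestFold_cases L2 (-1, none) with h2 | ⟨e2, he2, h2⟩
      · exfalso
        have h := hub2.2 a (hp.mem_iff.mp he0)
        rw [h2] at h
        have := hpos a he0
        simp at h; omega
      · have hmax1 := hub1.2 e2 (hp.mem_iff.mpr he2)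
        have hmax2 := hub2.2 e1 (hp.mem_iff.mp he1)
        rw [h1] at hmax1; rw [h2] at hmax2
        have heq : e1 = e2 :=
          eq_of_fst_eq_of_nodup (a :: t) hnd e1 e2 he1 (hp.mem_iff.mpr he2)
            (by simp at hmax1 hmax2; omega)
        rw [h1, h2, heq]

-- over an index-increasing list the sweep keeps exactly the last entry
theorem bestFold_inc (L : List (Int × Int)) (s : Int × Option Int)
    (hlt : ∀ e ∈ L, s.1 < e.1) (hpw : L.Pairwise (fun a b => a.1 < b.1)) :
    L.foldl bestStep s = match L.getLast? with
      | none => s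
      | some e => (e.1, some e.2) := by
  induction L generalizing s with
  | nil => rfl
  | cons e t ih =>
    simp only [List.foldl_cons]
    have hse : bestStep s e = (e.1, some e.2) := by
      simp [bestStep, hlt e (by simp)]
    rw [hse, ih (e.1, some e.2) (fun e' he' => (List.pairwise_cons.mp hpw).1 e' he')
      (List.pairwise_cons.mp hpw).2]
    cases t with
    | nil => rfl
    | cons a t' =>
      cases hL : (a :: t').getLast? with
      | none => rw [List.getLast?_eq_none_iff] at hL; cases hL
      | some x => simp [List.getLast?_cons_cons, hL]

-- filtering the second components commutes with projecting them
theorem map_snd_filter_snd (L : List (Int × Int)) (j : Int) :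
    (L.filter (fun e => decide (e.2 < j))).map Prod.snd
      = (L.map Prod.snd).filter (fun i => decide (i < j)) := by
  induction L with
  | nil => rfl
  | cons e t ih =>
    by_cases he : e.2 < j
    · simp [he, ih]
    · simp [he, ih]

-- in a value-sorted list, everything below j forms the prefix before the first j
theorem sorted_split (L : List (Int × Int)) (j : Int)
    (hpw : L.Pairwise (fun a b => a.2 ≤ b.2)) (hmem : ∃ i, (i, j) ∈ L) :
    ∃ e0 rest, L = L.filter (fun e => decide (e.2 < j)) ++ e0 :: rest ∧ e0.2 = j := by
  induction L with
  | nil => obtain ⟨i, hi⟩ := hmem; cases hi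
  | cons e t ih =>
    obtain ⟨h1, h2⟩ := List.pairwise_cons.mp hpw
    by_cases he : e.2 < j
    · obtain ⟨i, hi⟩ := hmem
      have hit : (i, j) ∈ t := by
        rcases List.mem_cons.mp hi with h | h
        · exfalso; rw [← h] at he; simp at he
        · exact h
      obtain ⟨e0, rest, hsp, he0⟩ := ih h2 ⟨i, hit⟩
      refine ⟨e0, rest, ?_, he0⟩
      rw [List.filter_cons, if_pos (by simpa using he), List.cons_append, ← hsp]
    · have hej : e.2 = j := by
        obtain ⟨i, hi⟩ := hmem
        rcases List.mem_cons.mp hi with h | h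
        · rw [← h]
        · have := h1 (i, j) h
          simp at this; omega
      refine ⟨e, t, ?_, hej⟩
      rw [List.filter_cons, if_neg (by simpa using he)]
      have : t.filter (fun e => decide (e.2 < j)) = [] := by
        rw [List.filter_eq_nil_iff]
        intro a ha
        have := h1 a ha
        simp; omega
      rw [this]; rfl

-- the enumerated list has strictly increasing, nonnegative, distinct indices
theorem enumerate_pairwise_fst (m : List Int) :
    (PySem.List.enumerate m).Pairwise (fun a b => a.1 < b.1) := by
  have h := PySem.List.map_fst_enumerate (xs := m) (s := 0)
  have hp : (PySem.List.pyRange 0 (0 + (m.length:Int)) 1).Pairwise (· < ·) :=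
    PySem.List.pairwise_lt_pyRange_one ..
  rw [← h] at hp; exact List.pairwise_map.mp hp

theorem enumerate_fst_nonneg (m : List Int) (e : Int × Int)
    (he : e ∈ PySem.List.enumerate m) : 0 ≤ e.1 := by
  have : e.1 ∈ (PySem.List.enumerate m).map Prod.fst := List.mem_map_of_mem he
  rw [PySem.List.map_fst_enumerate] at this
  exact (PySem.List.mem_pyRange_one.mp this).1

theorem enumerate_fst_nodup (m : List Int) : ((PySem.List.enumerate m).map Prod.fst).Nodup := by
  rw [PySem.List.map_fst_enumerate]; exact PySem.List.nodup_pyRange_one ..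

-- THE KEY LEMMA: the precomputed table answers exactly A's previos[-1] query
theorem prev_lookup (m : List Int) (j : Int) (hj : j ∈ m) :
    ((PySem.List.sorted (PySem.List.enumerate m) (fun t => t.2)).foldl prevStep
        (PySem.Dict.empty, (-1, none))).1.getD j none
      = (m.filter (fun i => decide (i < j))).getLast? := by
  have hperm : (PySem.List.sorted (PySem.List.enumerate m) (fun t => t.2)).Perm
      (PySem.List.enumerate m) := PySem.List.sorted_perm ..
  have hpw : (PySem.List.sorted (PySem.List.enumerate m) (fun t => t.2)).Pairwise
      (fun a b => a.2 ≤ b.2) := PySem.List.sorted_pairwise ..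
  have hjmem : ∃ i, (i, j) ∈ PySem.List.sorted (PySem.List.enumerate m) (fun t => t.2) := by
    have : j ∈ (PySem.List.enumerate m).map Prod.snd := by
      rw [PySem.List.map_snd_enumerate]; exact hj
    obtain ⟨e, he, hej⟩ := List.mem_map.mp this
    exact ⟨e.1, by rw [hperm.mem_iff]; simpa [← hej] using he⟩
  obtain ⟨e0, rest, hsp, he0j⟩ :=
    sorted_split (PySem.List.sorted (PySem.List.enumerate m) (fun t => t.2)) j hpw hjmem
  -- names for the two pieces
  generalize hTW : (PySem.List.sorted (PySem.List.enumerate m) (fun t => t.2)).filter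
      (fun e => decide (e.2 < j)) = TW at hsp
  -- run the fold: first TW, then e0 (which binds j), then rest (which keeps it)
  rw [hsp, List.foldl_append]
  have hTWmem : ∀ e ∈ TW, e.2 < j := by
    intro e he
    rw [← hTW] at he
    have := List.of_mem_filter he
    simpa using this
  have hTWsub : ∀ e ∈ TW, e ∈ PySem.List.enumerate m := by
    intro e he
    rw [← hTW] at he
    exact hperm.mem_iff.mp (List.mem_of_mem_filter he)
  have hnotin : (TW.foldl prevStep (PySem.Dict.empty, (-1, none))).1.contains j = false := by
    rcases Bool.eq_false_or_eq_true
        ((TW.foldl prevStep (PySem.Dict.empty, (-1, none))).1.contains j) with h | h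
    case inr => exact h
    case inl =>
      exfalso
      rcases contains_foldl_prevStep TW PySem.Dict.empty (-1, none) j h with hc | hmem
      · rw [PySem.Dict.contains_empty] at hc; cases hc
      · obtain ⟨e, he, hej⟩ := List.mem_map.mp hmem
        have h1 := hTWmem e he
        omega
  have hbound : ((e0 :: rest).foldl prevStep (TW.foldl prevStep (PySem.Dict.empty, (-1, none)))).1.get? j
      = some (TW.foldl prevStep (PySem.Dict.empty, (-1, none))).2.2 := by
    simp only [List.foldl_cons]
    refine get?_foldl_prevStep rest _ _ j _ ?_
    rw [he0j, if_neg (by simp [hnotin]), PySem.Dict.get?_insert, if_pos rfl]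
  -- identify the bound value with the last smaller element of m
  have hval : (TW.foldl prevStep (PySem.Dict.empty, (-1, none))).2.2
      = (m.filter (fun i => decide (i < j))).getLast? := by
    rw [snd_foldl_prevStep]
    have hTWP : TW.Perm ((PySem.List.enumerate m).filter (fun e => decide (e.2 < j))) := by
      rw [← hTW]; exact hperm.filter _
    have hndP : (((PySem.List.enumerate m).filter (fun e => decide (e.2 < j))).map Prod.fst).Nodup :=
      List.Nodup.sublist (List.Sublist.map Prod.fst List.filter_sublist) (enumerate_fst_nodup m)
    have hnd : (TW.map Prod.fst).Nodup := ((hTWP.map Prod.fst).nodup_iff).mpr hndP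
    have hposTW : ∀ e ∈ TW, (0:Int) ≤ e.1 := fun e he => enumerate_fst_nonneg m e (hTWsub e he)
    rw [bestFold_perm TW _ hTWP hnd hposTW]
    have hpwP : ((PySem.List.enumerate m).filter (fun e => decide (e.2 < j))).Pairwise
        (fun a b => a.1 < b.1) := (enumerate_pairwise_fst m).sublist List.filter_sublist
    have hposP : ∀ e ∈ (PySem.List.enumerate m).filter (fun e => decide (e.2 < j)),
        ((-1 : Int), (none : Option Int)).1 < e.1 := by
      intro e he
      have := enumerate_fst_nonneg m e (List.mem_of_mem_filter he)
      simp; omega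
    rw [bestFold_inc _ _ hposP hpwP]
    have hmapP : ((PySem.List.enumerate m).filter (fun e => decide (e.2 < j))).map Prod.snd
        = m.filter (fun i => decide (i < j)) := by
      rw [map_snd_filter_snd, PySem.List.map_snd_enumerate]
    rw [← hmapP, List.getLast?_map]
    cases hP : ((PySem.List.enumerate m).filter (fun e => decide (e.2 < j))).getLast? with
    | none => simp
    | some e => simp
  rw [PySem.Dict.getD_eq_get?_getD, hbound, hval]
  rfl

-- the two initial dicts coincide
theorem init_dicts (m : List Int) :
    PySem.Dict.ofList (m.map (fun i => ((i : Int), (0:Int))))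
      = m.foldl (fun (d : PySem.Dict Int Int) i => d.insert i 0) PySem.Dict.empty := by
  simp [PySem.Dict.ofList, PySem.Dict.update, List.foldl_map]

-- ===== VERDICT (by name: the statement is the Claim_ definition above) =====
theorem countKeysLess_spec : Claim_equal_countKeysLess := by
  intro equal m _ _
  unfold Spec_countKeysLess
  simp only [countKeysLess, countKeysLess_alt]
  rw [init_dicts]
  congr 1
  apply PySem.List.foldl_congr_mem
  intro less j hj
  rw [prev_lookup m j hj]
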